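-- pv_equiv track=rewrite | github.com/Fnhafiz/TubesTBFO | src/line_parser.py | symbols_parser
-- ===== SOURCE A (Python) =====
-- def symbols_parser(line, symbols):
--     line = ' '.join(line.split())
--     list_line = line.split(" ")
--     i = 0
--     while(i < len(list_line)):
--         j = 0
--         # diubah jadi list agar bisa diiterasi
--         list_word = list(list_line[i])
--
--         while(j < len(list_word)):           # iterasi per huruf
--             char = list_word[j]
--             if char in symbols:             # apabila char berupa simbol
--                 front_word = "".join(list_word[:j])
--                 back_word = "".join(list_word[j+1:])
--
--                 # Diatur per case
--                 if(j == 0 and j+1 == len(list_word)):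
--                     list_line[i] = char
--                 elif(j == 0):
--                     list_line[i] = char
--                     list_line.insert(i+1, back_word)
--                 elif(j+1 == len(list_word)):
--                     list_line[i] = front_word
--                     list_line.insert(i+1, char)
--                 else:
--                     list_line[i] = front_word
--                     list_line.insert(i+1, char)
--                     list_line.insert(i+2, back_word)
--                 break
--             j = j + 1
--         i = i + 1
--     return list_line
-- ===== SOURCE B (Python) =====
-- def symbols_parser(line, symbols):
--     # One left-to-right pass per word with a run accumulator, instead of
--     # repeated in-place list insertion and re-scanning.
--     words = ' '.join(line.split()).split(' ')
--     out = []
--     for word in words: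
--         toks = []
--         run = ''
--         for ch in word:
--             if ch in symbols:
--                 if run:
--                     toks.append(run)
--                     run = ''
--                 toks.append(ch)
--             else:
--                 run += ch
--         if run:
--             toks.append(run)
--         out.extend(toks if toks else [word])
--     return out
-- ===== Notes on version B (the rewrite author's own statement) =====
-- stated objective: alternative
-- what changed: A repeatedly splices front/symbol/back back into the word list and re-scans the inserted pieces; B tokenizes each word in a single left-to-right pass with a run accumulator and flattens the per-word token lists.
import Mathlib
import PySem

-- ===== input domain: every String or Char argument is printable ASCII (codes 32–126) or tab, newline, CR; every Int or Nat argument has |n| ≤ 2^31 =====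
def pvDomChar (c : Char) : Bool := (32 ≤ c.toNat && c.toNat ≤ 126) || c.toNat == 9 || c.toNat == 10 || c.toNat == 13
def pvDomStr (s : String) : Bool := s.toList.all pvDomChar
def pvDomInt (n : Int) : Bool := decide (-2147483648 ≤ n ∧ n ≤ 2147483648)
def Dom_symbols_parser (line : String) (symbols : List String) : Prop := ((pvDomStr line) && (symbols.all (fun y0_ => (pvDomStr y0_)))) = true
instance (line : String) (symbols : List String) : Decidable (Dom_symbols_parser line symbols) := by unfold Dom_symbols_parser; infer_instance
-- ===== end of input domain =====

-- B replaces A's in-place list insertion with re-scanning by one left-to-right pass per word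
-- keeping a run accumulator (objective: alternative, same observable result).

-- ===== PORT A =====
-- A's inner while loop: index of the first character of cs that is in symbols ('char in symbols').
def pvAFind (symbols : List String) : List Char → Option Nat
  | [] => none
  | c :: rest =>
    if symbols.contains (String.ofList [c]) then some 0
    else (pvAFind symbols rest).map (· + 1)

theorem pvAFind_lt (symbols : List String) (cs : List Char) (j : Nat)
    (h : pvAFind symbols cs = some j) : j < cs.length := by
  induction cs generalizing j with
  | nil => simp [pvAFind] at h
  | cons c rest ih =>
    simp only [pvAFind] at h
    split at h
    · simp only [Option.some.injEq] at h
      simp [← h]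
    · cases hr : pvAFind symbols rest with
      | none => rw [hr] at h; simp at h
      | some j' =>
        rw [hr] at h; simp only [Option.map_some, Option.some.injEq] at h
        have := ih j' hr
        simp [← h]; omega

-- weight of the not-yet-processed suffix of list_line (termination measure for A's outer while)
def pvWeight (l : List String) : Nat := (l.map (fun s => 2 * s.toList.length + 1)).sum

-- A's outer while loop, as a zipper over list_line: done = elements before i (reversed), todo = from i on.
def pvALoop (symbols : List String) (done todo : List String) : List String :=
  match todo with
  | [] => done.reverse
  | w :: rest =>
    -- list_word = w; char = ((w.toList.drop j).take 1); front_word = take j; back_word = drop (j+1)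
    match hj : pvAFind symbols w.toList with
    | none => pvALoop symbols (w :: done) rest
    | some j =>
      if h1 : j = 0 ∧ j + 1 = w.toList.length then
        pvALoop symbols (String.ofList ((w.toList.drop j).take 1) :: done) rest
      else if h2 : j = 0 then
        pvALoop symbols (String.ofList ((w.toList.drop j).take 1) :: done)
          (String.ofList (w.toList.drop (j + 1)) :: rest)
      else if h3 : j + 1 = w.toList.length then
        pvALoop symbols (String.ofList (w.toList.take j) :: done)
          (String.ofList ((w.toList.drop j).take 1) :: rest)
      else
        pvALoop symbols (String.ofList (w.toList.take j) :: done)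
          (String.ofList ((w.toList.drop j).take 1) :: String.ofList (w.toList.drop (j + 1)) :: rest)
termination_by pvWeight todo
decreasing_by
  all_goals simp only [pvWeight, List.map_cons, List.sum_cons, String.toList_ofList,
    List.length_drop, List.length_take]
  all_goals (try have := pvAFind_lt symbols w.toList j hj)
  all_goals omega

def symbols_parser (line : String) (symbols : List String) : List String :=
  let line2 := PySem.Str.join " " (PySem.Str.split₀ line)          -- line = ' '.join(line.split())
  let list_line := (PySem.Chars.splitOn line2.toList [' ']).map String.ofList  -- line.split(" ")
  pvALoop symbols [] list_line

-- ===== PORT B =====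
-- B's inner for loop: toks/run accumulators; emits tokens left to right.
def pvBWord (symbols : List String) : List Char → List Char → List String
  | [], run => if run = [] then [] else [String.ofList run]
  | c :: rest, run =>
    if symbols.contains (String.ofList [c]) then
      (if run = [] then [] else [String.ofList run]) ++
        String.ofList [c] :: pvBWord symbols rest []
    else pvBWord symbols rest (run ++ [c])

-- tokens of one word, with B's empty-word fallback ('toks if toks else [word]')
def pvBTok (symbols : List String) (w : String) : List String :=
  let toks := pvBWord symbols w.toList []
  if toks = [] then [w] else toks

def symbols_parser_alt (line : String) (symbols : List String) : List String :=
  let words := (PySem.Chars.splitOn (PySem.Str.join " " (PySem.Str.split₀ line)).toList [' ']).map String.ofList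
  words.flatMap (pvBTok symbols)

-- ===== PRECONDITION & SPEC =====
def Spec_symbols_parser (line : String) (symbols : List String) (out : List String) : Prop := out = symbols_parser_alt line symbols
instance (line : String) (symbols : List String) (out : List String) : Decidable (Spec_symbols_parser line symbols out) := by unfold Spec_symbols_parser; infer_instance

-- ===== CLAIM (what is proved, stated in full; the proofs are below) =====
def Claim_equal_symbols_parser : Prop := ∀ (line : String) (symbols : List String), Dom_symbols_parser line symbols → Spec_symbols_parser line symbols (symbols_parser line symbols)

-- ===== LEMMAS AND PROOFS =====

-- the character A finds is a symbol
theorem pvAFind_mem (symbols : List String) (cs : List Char) (j : Nat)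
    (h : pvAFind symbols cs = some j) :
    symbols.contains (String.ofList ((cs.drop j).take 1)) = true := by
  induction cs generalizing j with
  | nil => simp [pvAFind] at h
  | cons c rest ih =>
    simp only [pvAFind] at h
    split at h
    · rename_i hc
      simp only [Option.some.injEq] at h
      subst h
      simpa using hc
    · cases hr : pvAFind symbols rest with
      | none => rw [hr] at h; simp at h
      | some j' =>
        rw [hr] at h; simp only [Option.map_some, Option.some.injEq] at h
        subst h
        simpa using ih j' hr

-- a word with no symbol is one run
theorem pvBWord_none (symbols : List String) (cs : List Char)
    (h : pvAFind symbols cs = none) (run : List Char) :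
    pvBWord symbols cs run =
      if run ++ cs = [] then [] else [String.ofList (run ++ cs)] := by
  induction cs generalizing run with
  | nil => simp [pvBWord]
  | cons c rest ih =>
    simp only [pvAFind] at h
    split at h
    · simp at h
    · rename_i hc
      cases hr : pvAFind symbols rest with
      | none =>
        simp only [pvBWord]
        rw [if_neg hc, ih hr]
        simp only [List.append_assoc, List.cons_append, List.nil_append]
      | some j' => rw [hr] at h; simp at h

-- B's run splits at the first symbol exactly as A's front/char/back do
theorem pvBWord_some (symbols : List String) (cs : List Char) (j : Nat)
    (h : pvAFind symbols cs = some j) (run : List Char) :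
    pvBWord symbols cs run =
      (if run ++ cs.take j = [] then [] else [String.ofList (run ++ cs.take j)]) ++
        String.ofList ((cs.drop j).take 1) :: pvBWord symbols (cs.drop (j + 1)) [] := by
  induction cs generalizing j run with
  | nil => simp [pvAFind] at h
  | cons c rest ih =>
    simp only [pvAFind] at h
    split at h
    · rename_i hc
      simp only [Option.some.injEq] at h; subst h
      simp only [pvBWord]
      rw [if_pos hc]
      simp
    · rename_i hc
      cases hr : pvAFind symbols rest with
      | none => rw [hr] at h; simp at h
      | some j' =>
        rw [hr] at h; simp only [Option.map_some, Option.some.injEq] at h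
        subst h
        simp only [pvBWord]
        rw [if_neg hc, ih j' hr (run ++ [c])]
        simp only [List.take_succ_cons, List.drop_succ_cons, List.append_assoc,
          List.cons_append, List.nil_append]

-- B never produces an empty token list from a nonempty word (or pending run)
theorem pvBWord_ne_nil (symbols : List String) (cs : List Char) (run : List Char)
    (h : cs ≠ [] ∨ run ≠ []) : pvBWord symbols cs run ≠ [] := by
  induction cs generalizing run with
  | nil =>
    rcases h with h | h
    · exact absurd rfl h
    · simp [pvBWord, h]
  | cons c rest ih =>
    simp only [pvBWord]
    split
    · simp
    · exact ih (run ++ [c]) (Or.inr (by simp))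

-- step lemmas for A's loop
theorem pvALoop_nil (symbols done : List String) :
    pvALoop symbols done [] = done.reverse := by
  rw [pvALoop.eq_def]

theorem pvALoop_cons_none (symbols done : List String) (w : String) (rest : List String)
    (h : pvAFind symbols w.toList = none) :
    pvALoop symbols done (w :: rest) = pvALoop symbols (w :: done) rest := by
  rw [pvALoop.eq_def]
  split
  · rename_i heq; exact (List.cons_ne_nil _ _ heq).elim
  · rename_i w' rest' heq
    cases heq
    split
    · rfl
    · rename_i j heq2; rw [h] at heq2; cases heq2

theorem pvALoop_cons_some (symbols done : List String) (w : String) (rest : List String)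
    (j : Nat) (h : pvAFind symbols w.toList = some j) :
    pvALoop symbols done (w :: rest) =
      (if j = 0 ∧ j + 1 = w.toList.length then
        pvALoop symbols (String.ofList ((w.toList.drop j).take 1) :: done) rest
      else if j = 0 then
        pvALoop symbols (String.ofList ((w.toList.drop j).take 1) :: done)
          (String.ofList (w.toList.drop (j + 1)) :: rest)
      else if j + 1 = w.toList.length then
        pvALoop symbols (String.ofList (w.toList.take j) :: done)
          (String.ofList ((w.toList.drop j).take 1) :: rest)
      else
        pvALoop symbols (String.ofList (w.toList.take j) :: done)
          (String.ofList ((w.toList.drop j).take 1) :: String.ofList (w.toList.drop (j + 1)) :: rest)) := by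
  rw [pvALoop.eq_def]
  split
  · rename_i heq; exact (List.cons_ne_nil _ _ heq).elim
  · rename_i w' rest' heq
    cases heq
    split
    · rename_i heq2; rw [h] at heq2; cases heq2
    · rename_i j' heq2
      rw [h] at heq2
      cases heq2
      split_ifs <;> simp_all

-- token list of a one-symbol word is that symbol
theorem pvBTok_symbol (symbols : List String) (c : Char)
    (hc : symbols.contains (String.ofList [c]) = true) :
    pvBTok symbols (String.ofList [c]) = [String.ofList [c]] := by
  unfold pvBTok
  simp only [String.toList_ofList, pvBWord]
  rw [if_pos hc]
  simp

-- the single char A cuts out, as a literal list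
theorem pvDropTake_singleton (cs : List Char) (j : Nat) (hj : j < cs.length) :
    ∃ c, (cs.drop j).take 1 = [c] := by
  have hne : cs.drop j ≠ [] := by
    intro hc
    rw [List.drop_eq_nil_iff] at hc
    omega
  cases hd : cs.drop j with
  | nil => exact absurd hd hne
  | cons a t => exact ⟨a, by simp⟩

-- a nonempty word's token list has no empty fallback
theorem pvBTok_of_ne_nil (symbols : List String) (cs : List Char) (h : cs ≠ []) :
    pvBTok symbols (String.ofList cs) = pvBWord symbols cs [] := by
  unfold pvBTok
  simp only [String.toList_ofList]
  rw [if_neg (pvBWord_ne_nil symbols cs [] (Or.inl h))]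

theorem pvWeight_cons (s : String) (l : List String) :
    pvWeight (s :: l) = 2 * s.toList.length + 1 + pvWeight l := by
  simp [pvWeight]

-- main invariant: A's zipper loop flattens to B's per-word tokenisation
theorem pvALoop_eq (symbols : List String) (todo done : List String) :
    pvALoop symbols done todo = done.reverse ++ todo.flatMap (pvBTok symbols) := by
  suffices H : ∀ n todo done, pvWeight todo < n →
      pvALoop symbols done todo = done.reverse ++ todo.flatMap (pvBTok symbols) by
    exact H (pvWeight todo + 1) todo done (by omega)
  intro n
  induction n with
  | zero => intro todo done h; omega
  | succ n ih =>
    intro todo done h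
    match todo with
    | [] => simp [pvALoop_nil]
    | w :: rest =>
      have hW : pvWeight (w :: rest) = 2 * w.toList.length + 1 + pvWeight rest := by
        simp [pvWeight]
      cases hf : pvAFind symbols w.toList with
      | none =>
        rw [pvALoop_cons_none _ _ _ _ hf,
          ih rest (w :: done) (by rw [pvWeight_cons] at h; omega)]
        have hb := pvBWord_none symbols w.toList hf []
        simp only [List.nil_append] at hb
        have hbt : pvBTok symbols w = [w] := by
          unfold pvBTok
          rw [hb]
          by_cases hw : w.toList = []
          · simp [hw]
          · simp [hw]
        simp [hbt]
      | some j =>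
        have hlt := pvAFind_lt _ _ _ hf
        have hmem := pvAFind_mem _ _ _ hf
        obtain ⟨c, hc⟩ := pvDropTake_singleton w.toList j hlt
        rw [hc] at hmem
        have hb := pvBWord_some symbols w.toList j hf []
        simp only [List.nil_append] at hb
        have hwtok : pvBTok symbols w = pvBWord symbols w.toList [] := by
          rw [← String.ofList_toList (s := w), pvBTok_of_ne_nil]
          · simp
          · intro hcontra; rw [hcontra] at hlt; simp at hlt
        rw [pvALoop_cons_some _ _ _ _ j hf]
        by_cases h1 : j = 0 ∧ j + 1 = w.toList.length
        · rw [if_pos h1]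
          obtain ⟨h10, h11⟩ := h1
          subst h10
          rw [ih rest _ (by rw [pvWeight_cons] at h; omega)]
          have hdrop : w.toList.drop (0 + 1) = [] := List.drop_eq_nil_of_le (by omega)
          rw [hdrop] at hb
          have hbt : pvBTok symbols w = [String.ofList ((w.toList.drop 0).take 1)] := by
            rw [hwtok, hb]; simp [pvBWord]
          simp [hbt]
        · rw [if_neg h1]
          by_cases h2 : j = 0
          · rw [if_pos h2]
            subst h2
            have hlen2 : 2 ≤ w.toList.length := by omega
            have hbackne : w.toList.drop (0 + 1) ≠ [] := by
              intro hcontra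
              rw [List.drop_eq_nil_iff] at hcontra
              omega
            rw [ih _ _ (by rw [pvWeight_cons, String.toList_ofList, List.length_drop]; rw [pvWeight_cons] at h; omega)]
            have hbt : pvBTok symbols w =
                String.ofList ((w.toList.drop 0).take 1) ::
                  pvBWord symbols (w.toList.drop (0 + 1)) [] := by
              rw [hwtok, hb]; simp
            have htail := pvBTok_of_ne_nil symbols _ hbackne
            simp at htail
            simp [hbt, htail]
          · rw [if_neg h2]
            have hj1 : 1 ≤ j := by omega
            have htakene : w.toList.take j ≠ [] := by
              intro hcontra
              rcases List.take_eq_nil_iff.mp hcontra with h' | h'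
              · omega
              · rw [h'] at hlt; simp at hlt
            rw [if_neg htakene] at hb
            by_cases h3 : j + 1 = w.toList.length
            · rw [if_pos h3]
              rw [ih _ _ (by rw [pvWeight_cons, String.toList_ofList, hc, List.length_cons, List.length_nil]; rw [pvWeight_cons] at h; omega)]
              have hdrop : w.toList.drop (j + 1) = [] := List.drop_eq_nil_of_le (by omega)
              rw [hdrop] at hb
              have hbt : pvBTok symbols w =
                  [String.ofList (w.toList.take j), String.ofList ((w.toList.drop j).take 1)] := by
                rw [hwtok, hb]; simp [pvBWord]
              simp [hbt, hc, pvBTok_symbol symbols c hmem]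
            · rw [if_neg h3]
              have hbackne : w.toList.drop (j + 1) ≠ [] := by
                intro hcontra
                rw [List.drop_eq_nil_iff] at hcontra
                omega
              rw [ih _ _ (by rw [pvWeight_cons, pvWeight_cons, String.toList_ofList, String.toList_ofList, hc, List.length_cons, List.length_nil, List.length_drop]; rw [pvWeight_cons] at h; omega)]
              have hbt : pvBTok symbols w =
                  String.ofList (w.toList.take j) :: String.ofList ((w.toList.drop j).take 1) ::
                    pvBWord symbols (w.toList.drop (j + 1)) [] := by
                rw [hwtok, hb]; simp
              simp [hbt, hc, pvBTok_symbol symbols c hmem,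
                pvBTok_of_ne_nil symbols _ hbackne]

-- ===== VERDICT (by name: the statement is the Claim_ definition above) =====
theorem symbols_parser_spec : Claim_equal_symbols_parser := by
  intro line symbols _
  unfold Spec_symbols_parser symbols_parser symbols_parser_alt
  rw [pvALoop_eq]
  simp
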